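-- pv_equiv track=rewrite | github.com/Ramonr20/CompetitiveProgramming | Uva/UVa1061.py | findLetters
-- ===== SOURCE A (Python) =====
-- comb = {
--     'A A':'A',
--     'A B':'AB',
--     'A O':'A',
--     'B B':'B',
--     'B O':'B',
--     'O O':'O'
-- }
--
-- def findLetters(f, m):
--     lettersF = ''
--     lettersM = ''
--     for l,t in comb.items():
--         if f == t:
--             lettersF = lettersF + l + ' '
--         if m == t:
--             lettersM = lettersM + l + ' '
--     return lettersF,lettersM
-- ===== SOURCE B (Python) =====
-- comb = {
--     'A A':'A',
--     'A B':'AB',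
--     'A O':'A',
--     'B B':'B',
--     'B O':'B',
--     'O O':'O'
-- }
--
-- _reverse = {}
-- for _l, _t in comb.items():
--     _reverse[_t] = _reverse.get(_t, '') + _l + ' '
--
-- def findLetters(f, m):
--     return _reverse.get(f, ''), _reverse.get(m, '')
-- ===== Notes on version B (the rewrite author's own statement) =====
-- stated objective: simpler
-- what changed: B precomputes a reverse map phenotype -> concatenated genotype string in one module-level pass over comb (preserving insertion order and trailing spaces), so findLetters is just two dictionary lookups with '' as default instead of a matching-and-accumulating loop per call.
import Mathlib
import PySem

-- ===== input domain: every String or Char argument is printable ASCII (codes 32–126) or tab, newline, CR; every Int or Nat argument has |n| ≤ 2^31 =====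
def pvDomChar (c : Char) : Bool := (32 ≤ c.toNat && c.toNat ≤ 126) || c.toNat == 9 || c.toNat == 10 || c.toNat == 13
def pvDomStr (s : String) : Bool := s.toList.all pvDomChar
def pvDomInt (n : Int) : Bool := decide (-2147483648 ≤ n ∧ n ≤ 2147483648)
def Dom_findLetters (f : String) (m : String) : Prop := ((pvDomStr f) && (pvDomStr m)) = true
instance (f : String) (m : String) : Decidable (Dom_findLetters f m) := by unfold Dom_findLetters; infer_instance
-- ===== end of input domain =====

-- B replaces A's in-loop matching/accumulation with a reverse map phenotype → genotype string, built once, plus two lookups (objective: simpler).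

-- ===== PORT A =====
-- module-level dict comb (insertion order)
def comb : List (String × String) :=
  [("A A", "A"), ("A B", "AB"), ("A O", "A"), ("B B", "B"), ("B O", "B"), ("O O", "O")]

def findLetters (f : String) (m : String) : String × String :=
  comb.foldl
    (fun (acc : String × String) lt =>
      (if f = lt.2 then acc.1 ++ lt.1 ++ " " else acc.1,
       if m = lt.2 then acc.2 ++ lt.1 ++ " " else acc.2))
    ("", "")

-- ===== PORT B =====
-- module-level reverse map: phenotype → concatenated genotypes (built once from comb)
def revMap : PySem.Dict String String :=
  comb.foldl (fun d lt => d.insert lt.2 (d.getD lt.2 "" ++ lt.1 ++ " ")) (PySem.Dict.mk [])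

def findLetters_alt (f : String) (m : String) : String × String :=
  (revMap.getD f "", revMap.getD m "")

-- ===== PRECONDITION & SPEC =====
def Spec_findLetters (f : String) (m : String) (out : String × String) : Prop := out = findLetters_alt f m
instance (f : String) (m : String) (out : String × String) : Decidable (Spec_findLetters f m out) := by unfold Spec_findLetters; infer_instance

-- ===== CLAIM (what is proved, stated in full; the proofs are below) =====
def Claim_equal_findLetters : Prop := ∀ (f : String) (m : String), Dom_findLetters f m → Spec_findLetters f m (findLetters f m)

-- ===== LEMMAS AND PROOFS =====
-- A's accumulation for one phenotype string, written out
def accA (s : String) : String :=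
  comb.foldl (fun acc lt => if s = lt.2 then acc ++ lt.1 ++ " " else acc) ""

lemma findLetters_eq_accA (f m : String) : findLetters f m = (accA f, accA m) := by
  simp [findLetters, accA, comb, List.foldl]

-- the reverse-map lookup agrees with A's accumulation for every string
lemma accA_eq_lookup (s : String) : accA s = revMap.getD s "" := by
  by_cases h1 : s = "A"
  · subst h1; decide
  by_cases h2 : s = "AB"
  · subst h2; decide
  by_cases h3 : s = "B"
  · subst h3; decide
  by_cases h4 : s = "O"
  · subst h4; decide
  have e1 : ("A" == s) = false := by simp [Ne.symm h1]
  have e2 : ("AB" == s) = false := by simp [Ne.symm h2]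
  have e3 : ("B" == s) = false := by simp [Ne.symm h3]
  have e4 : ("O" == s) = false := by simp [Ne.symm h4]
  simp [accA, revMap, comb, List.foldl, PySem.Dict.getD, PySem.Dict.get?,
    PySem.Dict.insert, List.find?, h1, h2, h3, h4, e1, e2, e3, e4]

-- ===== VERDICT (by name: the statement is the Claim_ definition above) =====
theorem findLetters_spec : Claim_equal_findLetters := by
  intro f m _
  unfold Spec_findLetters findLetters_alt
  rw [findLetters_eq_accA, accA_eq_lookup, accA_eq_lookup]
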